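-- pv_equiv track=rewrite | github.com/brianhuynh2021/python_leetcode | Coding_Challenge/15_count_chars_to_drop.py | count_drops
-- ===== SOURCE A (Python) =====
-- def count_drops(array):
--     dropCount = 0
--     foundB = False  # Flag to indicate we've started finding B's
--     for char in array:
--         if char == 'B':
--             foundB = True
--         elif char == 'A' and foundB:
--             # If we find an A after finding a B, we need to drop it
--             dropCount += 1
--     return dropCount
-- ===== SOURCE B (Python) =====
-- def count_drops(array):
--     arr = list(array)
--     try:
--         i = arr.index('B')
--     except ValueError:
--         return 0
--     return arr[i + 1:].count('A')
-- ===== Notes on version B (the rewrite author's own statement) =====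
-- stated objective: simpler
-- what changed: Replaces the flag-driven single pass with a locate-then-count decomposition: find the first 'B' with list.index and count 'A' in the suffix after it (0 if no 'B').
import Mathlib
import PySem

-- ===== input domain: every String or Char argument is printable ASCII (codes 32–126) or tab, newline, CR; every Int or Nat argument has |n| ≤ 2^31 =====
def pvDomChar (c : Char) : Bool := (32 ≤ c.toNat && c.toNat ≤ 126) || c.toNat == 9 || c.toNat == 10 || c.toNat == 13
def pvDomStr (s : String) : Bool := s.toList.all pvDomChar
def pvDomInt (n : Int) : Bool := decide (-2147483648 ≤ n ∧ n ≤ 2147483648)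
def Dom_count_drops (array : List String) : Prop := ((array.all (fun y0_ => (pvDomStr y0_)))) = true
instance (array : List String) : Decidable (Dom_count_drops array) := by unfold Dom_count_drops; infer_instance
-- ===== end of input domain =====

-- B replaces A's flag-driven pass by locating the first "B" and counting "A" in the suffix; objective: simpler.

-- ===== PORT A =====
def count_drops (array : List String) : Int :=
  (array.foldl
    (fun (s : Int × Bool) ch =>
      if ch = "B" then (s.1, true)
      else if ch = "A" ∧ s.2 = true then (s.1 + 1, s.2)
      else s)
    (0, false)).1

-- ===== PORT B =====
def count_drops_alt (array : List String) : Int :=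
  match PySem.List.index? array "B" with
  | none => 0
  | some i => (PySem.List.count (PySem.List.slice array (some ((i : Int) + 1)) none) "A" : Int)

-- ===== PRECONDITION & SPEC =====
def Spec_count_drops (array : List String) (out : Int) : Prop := out = count_drops_alt array
instance (array : List String) (out : Int) : Decidable (Spec_count_drops array out) := by unfold Spec_count_drops; infer_instance

-- ===== CLAIM (what is proved, stated in full; the proofs are below) =====
def Claim_equal_count_drops : Prop := ∀ (array : List String), Dom_count_drops array → Spec_count_drops array (count_drops array)

-- ===== LEMMAS AND PROOFS =====

-- A's loop, once foundB is true, just counts the "A"s of the rest.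
theorem loopA_true (l : List String) (n : Int) :
    l.foldl
      (fun (s : Int × Bool) ch =>
        if ch = "B" then (s.1, true)
        else if ch = "A" ∧ s.2 = true then (s.1 + 1, s.2)
        else s)
      (n, true) = (n + (l.count "A" : Int), true) := by
  induction l generalizing n with
  | nil => simp
  | cons x xs ih =>
    by_cases hB : x = "B"
    · subst hB
      simp [List.foldl_cons, ih]
    · by_cases hA : x = "A"
      · subst hA
        simp [List.foldl_cons, hB, ih]
        ring
      · simp [List.foldl_cons, hB, hA, ih]

-- A's loop with foundB still false does nothing while no "B" appears.
theorem loopA_false (l : List String) (n : Int) (h : "B" ∉ l) :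
    l.foldl
      (fun (s : Int × Bool) ch =>
        if ch = "B" then (s.1, true)
        else if ch = "A" ∧ s.2 = true then (s.1 + 1, s.2)
        else s)
      (n, false) = (n, false) := by
  induction l with
  | nil => rfl
  | cons x xs ih =>
    have hx : x ≠ "B" := fun hx => h (hx ▸ List.mem_cons_self)
    have hxs : "B" ∉ xs := fun hm => h (List.mem_cons_of_mem _ hm)
    simp [List.foldl_cons, hx, ih hxs]

-- ===== VERDICT (by name: the statement is the Claim_ definition above) =====
theorem count_drops_spec : Claim_equal_count_drops := by
  intro array _
  unfold Spec_count_drops count_drops count_drops_alt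
  cases hidx : PySem.List.index? array "B" with
  | none =>
    have hnot : "B" ∉ array := (PySem.List.index?_eq_none_iff array "B").mp hidx
    rw [loopA_false array 0 hnot]
  | some i =>
    dsimp only
    obtain ⟨pre, suf, hsplit, hlen, hpre⟩ := (PySem.List.index?_eq_some_iff array "B" i).mp hidx
    subst hsplit
    have h1 : ((i : Int) + 1) = ((i + 1 : Nat) : Int) := by push_cast; ring
    rw [h1, PySem.List.slice_from_natCast]
    have hdrop : (pre ++ "B" :: suf).drop (i + 1) = suf := by
      subst hlen
      simp
    rw [hdrop, List.foldl_append, loopA_false pre 0 hpre]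
    simp [loopA_true, PySem.List.count]
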